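-- pv_equiv track=rewrite | github.com/KRtheom/FILE_SCANNER | scanner_engine.py | search_keywords
-- ===== SOURCE A (Python) =====
-- from typing import Any, Callable, Iterable
--
-- def search_keywords(
--     text_items: Iterable[tuple[str, str]],
--     keywords: list[str],
-- ) -> list[dict[str, str]]:
--     """텍스트 목록에서 키워드를 검색해 위치와 문맥 정보를 반환한다."""
--     normalized_keywords = _normalize_keyword_list(keywords)
--     if not normalized_keywords:
--         return []
--
--     results: list[dict[str, str]] = []
--     remaining: dict[str, str] = {kw.lower(): kw for kw in normalized_keywords}
--     iterator = iter(text_items)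
--
--     try:
--         for location, text in iterator:
--             if not remaining:
--                 break
--             if not text:
--                 continue
--
--             lowered_text = text.lower()
--
--             for lowered_keyword, keyword in list(remaining.items()):
--                 found_idx = lowered_text.find(lowered_keyword)
--                 if found_idx < 0:
--                     continue
--
--                 context_start = max(0, found_idx - 50)
--                 context_end = min(len(text), found_idx + len(keyword) + 50)
--                 context = text[context_start:context_end].strip()
--
--                 results.append(
--                     {
--                         "keyword": keyword,
--                         "location": location,
--                         "context": context,
--                     }
--                 )
--                 remaining.pop(lowered_keyword, None)
--
--             if not remaining:
--                 break
--     finally: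
--         close = getattr(iterator, "close", None)
--         if callable(close):
--             close()
--
--     return results
--
-- def _normalize_keyword_list(keywords: list[str]) -> list[str]:
--     normalized: list[str] = []
--     seen: set[str] = set()
--
--     for keyword in keywords:
--         if not isinstance(keyword, str):
--             continue
--         cleaned = keyword.strip()
--         if not cleaned:
--             continue
--         lowered = cleaned.lower()
--         if lowered in seen:
--             continue
--         seen.add(lowered)
--         normalized.append(cleaned)
--
--     return normalized
-- ===== SOURCE B (Python) =====
-- def _normalize_keyword_list(keywords):
--     normalized = []
--     seen = set()
--     for keyword in keywords:
--         if not isinstance(keyword, str):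
--             continue
--         cleaned = keyword.strip()
--         if not cleaned:
--             continue
--         lowered = cleaned.lower()
--         if lowered in seen:
--             continue
--         seen.add(lowered)
--         normalized.append(cleaned)
--     return normalized
--
--
-- def _first_hit(keyword, items):
--     """First (index, result-dict) of keyword over the text list, or None."""
--     lowered_keyword = keyword.lower()
--     for i, (location, text) in enumerate(items):
--         idx = text.lower().find(lowered_keyword)
--         if idx >= 0:
--             context_start = max(0, idx - 50)
--             context_end = min(len(text), idx + len(keyword) + 50)
--             return (
--                 i,
--                 {
--                     "keyword": keyword,
--                     "location": location,
--                     "context": text[context_start:context_end].strip(),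
--                 },
--             )
--     return None
--
--
-- def search_keywords(text_items, keywords):
--     # Keyword-outer scan: each keyword independently finds its first text,
--     # then results are emitted grouped by text position (A's output order).
--     items = list(text_items)
--     hits = []
--     for keyword in _normalize_keyword_list(keywords):
--         hit = _first_hit(keyword, items)
--         if hit is not None:
--             hits.append(hit)
--     return [entry for i in range(len(items)) for (j, entry) in hits if j == i]
-- ===== Notes on version B (the rewrite author's own statement) =====
-- stated objective: alternative
-- what changed: A sweeps the texts once while mutating a shrinking 'remaining' dict and scanning all still-unfound keywords per text; B scans per keyword independently (first text containing it), then emits the hits grouped by text position, with no mutable dict state.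
import Mathlib
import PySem

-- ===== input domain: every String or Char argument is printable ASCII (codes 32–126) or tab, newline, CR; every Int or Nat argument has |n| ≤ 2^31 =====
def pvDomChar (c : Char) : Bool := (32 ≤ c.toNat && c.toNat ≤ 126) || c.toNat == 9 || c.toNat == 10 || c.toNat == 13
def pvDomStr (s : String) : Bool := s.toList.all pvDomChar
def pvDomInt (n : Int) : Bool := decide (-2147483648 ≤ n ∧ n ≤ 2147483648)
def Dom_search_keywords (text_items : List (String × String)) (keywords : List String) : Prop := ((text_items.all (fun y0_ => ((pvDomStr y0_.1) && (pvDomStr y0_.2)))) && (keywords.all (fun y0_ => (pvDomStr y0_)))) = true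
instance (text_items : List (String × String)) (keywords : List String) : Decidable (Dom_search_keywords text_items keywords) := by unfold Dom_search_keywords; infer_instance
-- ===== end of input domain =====

-- B re-implements A keyword-outer (first containing text per keyword, emitted grouped
-- by text position) instead of A's text-outer sweep over a shrinking dict; same value proved.

-- ===== PORT A =====
-- shared helper: _normalize_keyword_list, identical in Source A and Source B (isinstance check
-- is vacuous under the List String type and is dropped)
def pvNormStep (st : PySem.Set String × List String) (kw : String) :
    PySem.Set String × List String :=
  let cleaned := PySem.Str.strip kw
  if cleaned = "" then st
  else
    let lowered := PySem.Str.lower cleaned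
    if PySem.Set.contains st.1 lowered then st
    else (PySem.Set.add st.1 lowered, st.2 ++ [cleaned])

def pvNormalize (keywords : List String) : List String :=
  (keywords.foldl pvNormStep (PySem.Set.empty, [])).2

-- shared helper: the result dict {"keyword": …, "location": …, "context": …} both
-- Pythons build literally from (location, text, keyword, found_idx)
def pvEntry (location text kw : String) (idx : Int) : List (String × String) :=
  let context_start := max 0 (idx - 50)
  let context_end := min (PySem.Str.len text) (idx + PySem.Str.len kw + 50)
  [("keyword", kw), ("location", location),
   ("context", PySem.Str.strip (PySem.Str.slice text (some context_start) (some context_end)))]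

-- body of A's inner 'for lowered_keyword, keyword in list(remaining.items())' loop
def pvScanStep (lowered_text location text : String)
    (st : PySem.Dict String String × List (List (String × String)))
    (p : String × String) :
    PySem.Dict String String × List (List (String × String)) :=
  let idx := PySem.Str.find lowered_text p.1
  if idx < 0 then st
  else (st.1.erase p.1, st.2 ++ [pvEntry location text p.2 idx])

-- A's 'for location, text in iterator' loop with its two 'if not remaining: break's
def pvSearchLoop : List (String × String) → PySem.Dict String String →
    List (List (String × String)) → List (List (String × String))
  | [], _, results => results
  | (location, text) :: rest, remaining, results =>
    if remaining.items.isEmpty then results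
    else if text = "" then pvSearchLoop rest remaining results
    else
      let lowered_text := PySem.Str.lower text
      let st := remaining.items.foldl (pvScanStep lowered_text location text)
        (remaining, results)
      if st.1.items.isEmpty then st.2 else pvSearchLoop rest st.1 st.2

def search_keywords (text_items : List (String × String)) (keywords : List String) :
    List (List (String × String)) :=
  let normalized_keywords := pvNormalize keywords
  if normalized_keywords.isEmpty then []
  else
    let remaining := normalized_keywords.foldl
      (fun d kw => d.insert (PySem.Str.lower kw) kw) PySem.Dict.empty
    pvSearchLoop text_items remaining []

-- ===== PORT B =====
-- _first_hit: first (index, entry) of one keyword over the text list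
def pvFirstHit (lowered_keyword kw : String) :
    List (String × String) → Nat → Option (Nat × List (String × String))
  | [], _ => none
  | (location, text) :: rest, i =>
    let idx := PySem.Str.find (PySem.Str.lower text) lowered_keyword
    if 0 ≤ idx then some (i, pvEntry location text kw idx)
    else pvFirstHit lowered_keyword kw rest (i + 1)

def search_keywords_alt (text_items : List (String × String)) (keywords : List String) :
    List (List (String × String)) :=
  let hits := (pvNormalize keywords).foldl
    (fun acc kw =>
      match pvFirstHit (PySem.Str.lower kw) kw text_items 0 with
      | some hit => acc ++ [hit]
      | none => acc) []
  (List.range text_items.length).flatMap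
    (fun i => hits.filterMap (fun h => if h.1 = i then some h.2 else none))

-- ===== PRECONDITION & SPEC =====
def Spec_search_keywords (text_items : List (String × String)) (keywords : List String) (out : List (List (String × String))) : Prop := out = search_keywords_alt text_items keywords
instance (text_items : List (String × String)) (keywords : List String) (out : List (List (String × String))) : Decidable (Spec_search_keywords text_items keywords out) := by unfold Spec_search_keywords; infer_instance

-- ===== CLAIM (what is proved, stated in full; the proofs are below) =====
def Claim_equal_search_keywords : Prop := ∀ (text_items : List (String × String)) (keywords : List String), Dom_search_keywords text_items keywords → Spec_search_keywords text_items keywords (search_keywords text_items keywords)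

-- ===== LEMMAS AND PROOFS =====

-- A's loop, state-free: per text, entries of the still-pending pairs found there, pairs
-- not found remain pending
def pvARun : List (String × String) → List (String × String) → List (List (String × String))
  | [], _ => []
  | (location, text) :: rest, r =>
    if r.isEmpty then []
    else if text = "" then pvARun rest r
    else
      (r.filterMap fun p =>
        if PySem.Str.find (PySem.Str.lower text) p.1 < 0 then none
        else some (pvEntry location text p.2 (PySem.Str.find (PySem.Str.lower text) p.1)))
      ++ pvARun rest (r.filter fun p => decide (PySem.Str.find (PySem.Str.lower text) p.1 < 0))

lemma pvARun_nil (ts : List (String × String)) : pvARun ts [] = [] := by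
  cases ts with
  | nil => rfl
  | cons t ts => cases t; simp [pvARun]

-- the invariant produced by normalization
lemma pvNormStep_inv :
    ∀ (ks : List String) (s : PySem.Set String) (a : List String),
      (∀ x ∈ a, PySem.Str.lower x ∈ s) → ((a.map PySem.Str.lower).Nodup) →
      (∀ x ∈ a, x ≠ "") →
      (((ks.foldl pvNormStep (s, a)).2.map PySem.Str.lower).Nodup ∧
        ∀ x ∈ (ks.foldl pvNormStep (s, a)).2, x ≠ "") := by
  intro ks
  induction ks with
  | nil => intro s a h1 h2 h3; exact ⟨h2, h3⟩
  | cons kw ks ih =>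
    intro s a h1 h2 h3
    simp only [List.foldl_cons]
    by_cases hc : PySem.Str.strip kw = ""
    · rw [show pvNormStep (s, a) kw = (s, a) by simp [pvNormStep, hc]]
      exact ih s a h1 h2 h3
    · by_cases hmem : PySem.Set.contains s (PySem.Str.lower (PySem.Str.strip kw)) = true
      · rw [show pvNormStep (s, a) kw = (s, a) by
          simp [pvNormStep, hc]; exact (PySem.Set.contains_iff _ _).1 hmem]
        exact ih s a h1 h2 h3
      · simp only [Bool.not_eq_true] at hmem
        rw [show pvNormStep (s, a) kw
            = (PySem.Set.add s (PySem.Str.lower (PySem.Str.strip kw)),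
               a ++ [PySem.Str.strip kw]) by
          simp [pvNormStep, hc]
          exact fun hm => absurd hm (by simpa using hmem)]
        apply ih
        · intro x hx
          rcases List.mem_append.1 hx with h | h
          · exact (PySem.Set.mem_add _ _ _).2 (Or.inl (h1 x h))
          · simp at h; subst h; exact (PySem.Set.mem_add _ _ _).2 (Or.inr rfl)
        · rw [List.map_append]
          simp only [List.map_cons, List.map_nil]
          refine List.Nodup.append h2 (List.nodup_singleton _) ?_
          intro x hx hy
          simp at hy; subst hy
          have hs : PySem.Str.lower (PySem.Str.strip kw) ∈ s := by
            rcases List.mem_map.1 hx with ⟨y, hy', he⟩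
            exact he ▸ h1 y hy'
          have := (PySem.Set.contains_iff _ _).2 hs
          rw [hmem] at this; cases this
        · intro x hx
          rcases List.mem_append.1 hx with h | h
          · exact h3 x h
          · simp at h; subst h; exact hc

lemma pvNormalize_inv (keywords : List String) :
    ((pvNormalize keywords).map PySem.Str.lower).Nodup ∧
      ∀ x ∈ pvNormalize keywords, x ≠ "" := by
  exact pvNormStep_inv keywords PySem.Set.empty [] (by simp) (by simp) (by simp)

lemma pvLower_ne_empty {s : String} (h : s ≠ "") : PySem.Str.lower s ≠ "" := by
  intro he
  apply h
  have := congrArg String.toList he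
  simp [PySem.Str.toList_lower, PySem.Chars.lower] at this
  exact String.ext (by simp [this])

-- inner loop of A over the snapshot list, with erase on the threaded dict
lemma pvInner_eq (location text : String) :
    ∀ (l pre : List (String × String)) (d : PySem.Dict String String)
      (res : List (List (String × String))),
      d.items = pre ++ l → ((d.items).map Prod.fst).Nodup →
      l.foldl (pvScanStep (PySem.Str.lower text) location text) (d, res)
      = (PySem.Dict.mk (pre ++ l.filter fun p => decide (PySem.Str.find (PySem.Str.lower text) p.1 < 0)),
         res ++ l.filterMap fun p =>
           if PySem.Str.find (PySem.Str.lower text) p.1 < 0 then none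
           else some (pvEntry location text p.2 (PySem.Str.find (PySem.Str.lower text) p.1))) := by
  intro l
  induction l with
  | nil =>
    intro pre d res hitems hnd
    simp only [List.foldl_nil, List.filter_nil, List.filterMap_nil, List.append_nil]
    refine Prod.ext ?_ rfl
    apply PySem.Dict.ext
    simpa using hitems
  | cons p tl ih =>
    intro pre d res hitems hnd
    simp only [List.foldl_cons]
    by_cases hf : PySem.Chars.find (PySem.Chars.lower text.toList) p.1.toList < 0
    · rw [show pvScanStep (PySem.Str.lower text) location text (d, res) p = (d, res) by
        simp [pvScanStep, hf]]
      rw [ih (pre ++ [p]) d res (by simp [hitems]) hnd]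
      simp [hf]
    · rw [show pvScanStep (PySem.Str.lower text) location text (d, res) p
          = (d.erase p.1, res ++ [pvEntry location text p.2
              (PySem.Str.find (PySem.Str.lower text) p.1)]) by
        simp [pvScanStep, hf]]
      have hnd' : ((pre ++ p :: tl).map Prod.fst).Nodup := by rwa [hitems] at hnd
      rw [List.map_append, List.map_cons] at hnd'
      obtain ⟨hn1, hn2, hn3⟩ := List.nodup_append.mp hnd'
      have hpre : ∀ q ∈ pre, q.1 ≠ p.1 := by
        intro q hq he
        have hm : q.1 ∈ pre.map Prod.fst := List.mem_map_of_mem hq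
        rw [he] at hm
        exact hn3 _ hm _ List.mem_cons_self rfl
      have htl : ∀ q ∈ tl, q.1 ≠ p.1 := by
        intro q hq he
        have hm : q.1 ∈ tl.map Prod.fst := List.mem_map_of_mem hq
        rw [he] at hm
        exact (List.nodup_cons.mp hn2).1 hm
      have herase : (d.erase p.1).items = pre ++ tl := by
        show (d.items.filter _) = _
        rw [hitems, List.filter_append, List.filter_cons]
        rw [List.filter_eq_self.mpr (by intro q hq; simpa using hpre q hq),
            List.filter_eq_self.mpr (by intro q hq; simpa using htl q hq)]
        simp
      have hnd2 : (((d.erase p.1).items).map Prod.fst).Nodup := by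
        rw [herase, List.map_append]
        refine List.nodup_append.mpr ⟨hn1, (List.nodup_cons.mp hn2).2, ?_⟩
        intro a ha b hb
        exact hn3 a ha b (List.mem_cons_of_mem _ hb)
      rw [ih pre (d.erase p.1) _ herase hnd2]
      simp [hf]

lemma pvSearchLoop_eq :
    ∀ (ts : List (String × String)) (d : PySem.Dict String String)
      (res : List (List (String × String))),
      ((d.items).map Prod.fst).Nodup →
      pvSearchLoop ts d res = res ++ pvARun ts d.items := by
  intro ts
  induction ts with
  | nil => intro d res _; simp [pvSearchLoop, pvARun]
  | cons t ts ih =>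
    obtain ⟨location, text⟩ := t
    intro d res hnd
    by_cases hemp : d.items.isEmpty
    · rw [show pvSearchLoop ((location, text) :: ts) d res = res by
        simp [pvSearchLoop, hemp]]
      rw [show pvARun ((location, text) :: ts) d.items = [] by
        simp [pvARun, List.isEmpty_iff.1 hemp]]
      simp
    · by_cases htext : text = ""
      · rw [show pvSearchLoop ((location, text) :: ts) d res
            = pvSearchLoop ts d res by simp [pvSearchLoop, hemp, htext]]
        rw [show pvARun ((location, text) :: ts) d.items = pvARun ts d.items by
          simp [pvARun, hemp, htext]]
        exact ih d res hnd
      · have hstep := pvInner_eq location text d.items [] d res rfl hnd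
        rw [show pvSearchLoop ((location, text) :: ts) d res
            = (let st := d.items.foldl
                (pvScanStep (PySem.Str.lower text) location text) (d, res)
               if st.1.items.isEmpty then st.2 else pvSearchLoop ts st.1 st.2) by
          simp [pvSearchLoop, hemp, htext]]
        simp only [hstep, List.nil_append]
        have harr : pvARun ((location, text) :: ts) d.items
            = (d.items.filterMap fun p =>
                if PySem.Str.find (PySem.Str.lower text) p.1 < 0 then none
                else some (pvEntry location text p.2
                  (PySem.Str.find (PySem.Str.lower text) p.1)))
              ++ pvARun ts (d.items.filter fun p =>
                decide (PySem.Str.find (PySem.Str.lower text) p.1 < 0)) := by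
          simp [pvARun, hemp, htext]
        rw [harr]
        by_cases hemp2 : (d.items.filter fun p =>
            decide (PySem.Str.find (PySem.Str.lower text) p.1 < 0)).isEmpty
        · simp only [hemp2, if_pos]
          rw [List.isEmpty_iff.1 hemp2, pvARun_nil]
          simp
        · simp only [hemp2, if_neg, Bool.false_eq_true, not_false_iff]
          rw [ih _ _ (by
            exact List.Nodup.sublist (List.Sublist.map _ List.filter_sublist) hnd)]
          simp

lemma pvFirstHit_shift (lk kw : String) :
    ∀ (ts : List (String × String)) (i j : Nat),
      pvFirstHit lk kw ts (i + j) = (pvFirstHit lk kw ts i).map (fun h => (h.1 + j, h.2)) := by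
  intro ts
  induction ts with
  | nil => intro i j; rfl
  | cons t ts ih =>
    obtain ⟨location, text⟩ := t
    intro i j
    by_cases hf : 0 ≤ PySem.Chars.find (PySem.Chars.lower text.toList) lk.toList
    · simp [pvFirstHit, hf]
    · simp only [pvFirstHit]
      simp only [PySem.Str.find_eq, PySem.Str.toList_lower, if_neg hf]
      rw [show i + j + 1 = (i + 1) + j by omega]
      exact ih (i + 1) j

-- the core exchange: A's text-outer sweep equals B's keyword-outer grouped emission
lemma pvMain (ts : List (String × String)) :
    ∀ (r : List (String × String)),
      (∀ p ∈ r, p.1 = PySem.Str.lower p.2 ∧ p.2 ≠ "") →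
      pvARun ts r = (List.range ts.length).flatMap
        (fun i => r.filterMap fun p =>
          (pvFirstHit p.1 p.2 ts 0).bind fun h => if h.1 = i then some h.2 else none) := by
  induction ts with
  | nil =>
    intro r hr
    simp [pvARun]
  | cons t ts ih =>
    obtain ⟨location, text⟩ := t
    intro r hr
    by_cases hr0 : r = []
    · subst hr0
      rw [pvARun_nil]
      exact (List.flatMap_eq_nil_iff.mpr (fun i _ => rfl)).symm
    · have hbzero : ∀ (o : Option (Nat × List (String × String))),
          ((o.map (fun h => (h.1 + 1, h.2))).bind
            fun h => if h.1 = 0 then some h.2 else none) = none := by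
        intro o; cases o <;> simp
      have hbshift : ∀ (o : Option (Nat × List (String × String))) (i : Nat),
          ((o.map (fun h => (h.1 + 1, h.2))).bind
            fun h => if h.1 = i + 1 then some h.2 else none)
          = o.bind (fun h => if h.1 = i then some h.2 else none) := by
        intro o i; cases o with
        | none => rfl
        | some h => simp
      have hhead : ∀ p : String × String, pvFirstHit p.1 p.2 ((location, text) :: ts) 0
          = if 0 ≤ PySem.Chars.find (PySem.Chars.lower text.toList) p.1.toList then
              some (0, pvEntry location text p.2
                (PySem.Chars.find (PySem.Chars.lower text.toList) p.1.toList))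
            else (pvFirstHit p.1 p.2 ts 0).map (fun h => (h.1 + 1, h.2)) := by
        intro p
        by_cases hf : 0 ≤ PySem.Chars.find (PySem.Chars.lower text.toList) p.1.toList
        · simp [pvFirstHit, hf]
        · simp only [pvFirstHit, PySem.Str.find_eq, PySem.Str.toList_lower, if_neg hf]
          exact pvFirstHit_shift p.1 p.2 ts 0 1
      simp only [List.length_cons, List.range_succ_eq_map, List.flatMap_cons,
        List.flatMap_map]
      by_cases htext : text = ""
      · subst htext
        have hnf : ∀ p ∈ r, ¬ (0 ≤ PySem.Chars.find
            (PySem.Chars.lower ("" : String).toList) p.1.toList) := by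
          intro p hp
          obtain ⟨hlow, hne⟩ := hr p hp
          have hne1 : p.1 ≠ "" := fun he => pvLower_ne_empty hne (hlow ▸ he)
          have : PySem.Chars.find (PySem.Chars.lower ("" : String).toList) p.1.toList
              = -1 := by
            apply (PySem.Chars.find_eq_neg_one_iff _ _).2
            intro hinf
            exact hne1 (by simpa [PySem.Chars.lower] using hinf)
          omega
        rw [show pvARun ((location, "") :: ts) r = pvARun ts r by
          simp [pvARun, hr0]]
        rw [List.filterMap_congr (g := fun _ => none)
          (fun p hp => by rw [hhead p, if_neg (hnf p hp)]; exact hbzero _)]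
        rw [show (fun i => r.filterMap fun p =>
              (pvFirstHit p.1 p.2 ((location, "") :: ts) 0).bind
                fun h => if h.1 = Nat.succ i then some h.2 else none)
            = (fun i => r.filterMap fun p =>
              (pvFirstHit p.1 p.2 ts 0).bind
                fun h => if h.1 = i then some h.2 else none) from
          funext fun i => List.filterMap_congr (fun p hp => by
            rw [hhead p, if_neg (hnf p hp)]; exact hbshift _ i)]
        rw [ih r hr]
        simp
      · rw [show pvARun ((location, text) :: ts) r
            = (r.filterMap fun p =>
                if PySem.Str.find (PySem.Str.lower text) p.1 < 0 then none
                else some (pvEntry location text p.2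
                  (PySem.Str.find (PySem.Str.lower text) p.1)))
              ++ pvARun ts (r.filter fun p =>
                decide (PySem.Str.find (PySem.Str.lower text) p.1 < 0)) by
          simp [pvARun, hr0, htext]]
        congr 1
        · refine (List.filterMap_congr (fun p _ => ?_)).symm
          rw [hhead p]
          by_cases hf : 0 ≤ PySem.Chars.find (PySem.Chars.lower text.toList) p.1.toList
          · rw [if_pos hf]
            simp only [PySem.Str.find_eq, PySem.Str.toList_lower]
            rw [if_neg (by omega)]
            simp
          · rw [if_neg hf, hbzero]
            simp only [PySem.Str.find_eq, PySem.Str.toList_lower]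
            rw [if_pos (by omega)]
        · rw [show (fun i => r.filterMap fun p =>
                (pvFirstHit p.1 p.2 ((location, text) :: ts) 0).bind
                  fun h => if h.1 = Nat.succ i then some h.2 else none)
              = (fun i => r.filterMap fun p =>
                if decide (PySem.Str.find (PySem.Str.lower text) p.1 < 0) = true then
                  (pvFirstHit p.1 p.2 ts 0).bind
                    fun h => if h.1 = i then some h.2 else none
                else none) from
            funext fun i => List.filterMap_congr (fun p hp => by
              rw [hhead p]
              by_cases hf : 0 ≤ PySem.Chars.find
                  (PySem.Chars.lower text.toList) p.1.toList
              · rw [if_pos hf]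
                simp only [PySem.Str.find_eq, PySem.Str.toList_lower]
                rw [if_neg (by simpa using (by omega : ¬ (PySem.Chars.find
                  (PySem.Chars.lower text.toList) p.1.toList < 0)))]
                simp
              · rw [if_neg hf, hbshift _ i]
                simp only [PySem.Str.find_eq, PySem.Str.toList_lower]
                rw [if_pos (by simpa using (by omega : PySem.Chars.find
                  (PySem.Chars.lower text.toList) p.1.toList < 0))])]
          rw [show (fun i => r.filterMap fun p =>
                if decide (PySem.Str.find (PySem.Str.lower text) p.1 < 0) = true then
                  (pvFirstHit p.1 p.2 ts 0).bind
                    fun h => if h.1 = i then some h.2 else none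
                else none)
              = (fun i => (r.filter fun p =>
                  decide (PySem.Str.find (PySem.Str.lower text) p.1 < 0)).filterMap
                    fun p => (pvFirstHit p.1 p.2 ts 0).bind
                      fun h => if h.1 = i then some h.2 else none) from
            funext fun i => (List.filterMap_filter).symm]
          exact ih (r.filter fun p =>
            decide (PySem.Str.find (PySem.Str.lower text) p.1 < 0))
            (fun p hp => hr p (List.mem_of_mem_filter hp))

-- ===== VERDICT (by name: the statement is the Claim_ definition above) =====
theorem search_keywords_spec : Claim_equal_search_keywords := by
  intro text_items keywords _
  show search_keywords text_items keywords = search_keywords_alt text_items keywords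
  obtain ⟨hnodup, hne⟩ := pvNormalize_inv keywords
  by_cases hN : (pvNormalize keywords).isEmpty
  · rw [show search_keywords text_items keywords = [] by
      simp [search_keywords, hN]]
    rw [List.isEmpty_iff] at hN
    unfold search_keywords_alt
    rw [hN]
    exact (List.flatMap_eq_nil_iff.mpr (fun i _ => rfl)).symm
  · have hfresh : ∀ a ∈ pvNormalize keywords,
        (PySem.Dict.empty : PySem.Dict String String).contains (PySem.Str.lower a)
          = false := fun a _ => PySem.Dict.contains_empty _
    have hitems : ((pvNormalize keywords).foldl
          (fun d kw => d.insert (PySem.Str.lower kw) kw)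
          (PySem.Dict.empty : PySem.Dict String String)).items
        = (pvNormalize keywords).map (fun kw => (PySem.Str.lower kw, kw)) := by
      have h := PySem.Dict.items_foldl_insert_fresh (pvNormalize keywords)
        PySem.Str.lower (fun a => a) PySem.Dict.empty hfresh hnodup
      simpa using h
    have hknd : ((((pvNormalize keywords).foldl
          (fun d kw => d.insert (PySem.Str.lower kw) kw)
          (PySem.Dict.empty : PySem.Dict String String)).items).map Prod.fst).Nodup := by
      rw [hitems, List.map_map]
      simpa using hnodup
    rw [show search_keywords text_items keywords
        = pvSearchLoop text_items
            ((pvNormalize keywords).foldl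
              (fun d kw => d.insert (PySem.Str.lower kw) kw) PySem.Dict.empty) [] by
      simp [search_keywords, hN]]
    rw [pvSearchLoop_eq text_items _ [] hknd, hitems, List.nil_append]
    rw [pvMain text_items ((pvNormalize keywords).map
        (fun kw => (PySem.Str.lower kw, kw)))
      (by
        intro p hp
        obtain ⟨kw, hkw, rfl⟩ := List.mem_map.1 hp
        exact ⟨rfl, hne kw hkw⟩)]
    unfold search_keywords_alt
    have hh : ∀ (l : List String) (acc : List (Nat × List (String × String))),
        l.foldl (fun acc kw =>
          match pvFirstHit (PySem.Str.lower kw) kw text_items 0 with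
          | some hit => acc ++ [hit]
          | none => acc) acc
        = acc ++ l.filterMap
            (fun kw => pvFirstHit (PySem.Str.lower kw) kw text_items 0) := by
      intro l
      induction l with
      | nil => intro acc; simp
      | cons x l ihl =>
        intro acc
        simp only [List.foldl_cons, List.filterMap_cons]
        cases hfx : pvFirstHit (PySem.Str.lower x) x text_items 0 with
        | none => rw [ihl acc]
        | some h => rw [ihl (acc ++ [h])]; simp
    refine congrArg₂ _ ?_ rfl
    funext i
    rw [List.filterMap_map, hh (pvNormalize keywords) [], List.nil_append,
      List.filterMap_filterMap]
    rfl
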